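-- pv_equiv track=rewrite | github.com/Awrthdrew/algoritmo-estructura-datos | semana_6/EjerciciosMatricesCuestion1.py | crearMatrizBidimencional3
-- ===== SOURCE A (Python) =====
-- def crearMatrizBidimencional3(fila:int, columna:int):
--     x=[]
--     for i in range(fila):
--         linea=[]
--         for j in range(columna):
--             #linea.insert(j,j)
--             linea.append(j)
--         x.insert(i,linea)
--     return x
-- ===== SOURCE B (Python) =====
-- def crearMatrizBidimencional3(fila: int, columna: int):
--     # Flat construction + reshape: one linear pass builds all fila*columna
--     # values as k % columna, then the matrix is cut out of it by slicing.
--     if columna <= 0: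
--         return [[] for _ in range(fila)]
--     flat = [k % columna for k in range(fila * columna)]
--     return [flat[r * columna:(r + 1) * columna] for r in range(fila)]
-- ===== Notes on version B (the rewrite author's own statement) =====
-- stated objective: alternative
-- what changed: Replaces the nested per-row regeneration with a reshape algorithm: one flat pass builds the fila*columna values as k % columna, and the matrix is then carved out of the flat list by slicing it into columna-sized chunks.
import Mathlib
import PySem

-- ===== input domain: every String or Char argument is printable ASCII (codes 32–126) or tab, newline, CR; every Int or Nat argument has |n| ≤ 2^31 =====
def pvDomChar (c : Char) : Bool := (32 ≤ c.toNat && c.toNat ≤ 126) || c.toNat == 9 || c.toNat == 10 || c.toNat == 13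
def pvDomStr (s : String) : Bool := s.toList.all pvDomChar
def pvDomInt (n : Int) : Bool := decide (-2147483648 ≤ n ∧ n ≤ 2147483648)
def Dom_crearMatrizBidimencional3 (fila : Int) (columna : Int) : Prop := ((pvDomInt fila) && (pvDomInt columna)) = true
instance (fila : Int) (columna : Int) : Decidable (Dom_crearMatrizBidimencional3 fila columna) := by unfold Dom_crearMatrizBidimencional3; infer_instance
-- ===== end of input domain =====

-- B builds the matrix by a flat pass (k % columna over range(fila*columna)) and reshapes it by slicing; return value proved equal to A's.

-- ===== PORT A =====
-- faithful port of A: outer loop inserts each freshly rebuilt row at index i (i = current length)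
def crearMatrizBidimencional3 (fila : Int) (columna : Int) : List (List Int) :=
  (PySem.List.pyRange 0 fila 1).foldl
    (fun x i =>
      let linea := (PySem.List.pyRange 0 columna 1).foldl (fun l j => l ++ [j]) []
      PySem.List.insert x i linea)
    []

-- ===== PORT B =====
-- port of B: one flat list of k % columna values, then sliced into columna-sized rows
def crearMatrizBidimencional3_alt (fila : Int) (columna : Int) : List (List Int) :=
  if columna ≤ 0 then (PySem.List.pyRange 0 fila 1).map (fun _ => ([] : List Int))
  else
    let flat := (PySem.List.pyRange 0 (fila * columna) 1).map (fun k => PySem.Int.mod k columna)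
    (PySem.List.pyRange 0 fila 1).map
      (fun r => PySem.List.slice flat (some (r * columna)) (some ((r + 1) * columna)))

-- ===== PRECONDITION & SPEC =====
def Spec_crearMatrizBidimencional3 (fila : Int) (columna : Int) (out : List (List Int)) : Prop := out = crearMatrizBidimencional3_alt fila columna
instance (fila : Int) (columna : Int) (out : List (List Int)) : Decidable (Spec_crearMatrizBidimencional3 fila columna out) := by unfold Spec_crearMatrizBidimencional3; infer_instance

-- ===== CLAIM =====
def Claim_equal_crearMatrizBidimencional3 : Prop := ∀ (fila : Int) (columna : Int), Dom_crearMatrizBidimencional3 fila columna → Spec_crearMatrizBidimencional3 fila columna (crearMatrizBidimencional3 fila columna)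

-- ===== LEMMAS AND PROOFS =====

lemma foldl_append_singleton (l acc : List Int) :
    l.foldl (fun a x => a ++ [x]) acc = acc ++ l := by
  induction l generalizing acc with
  | nil => simp
  | cons h t ih => simp [List.foldl, ih]

lemma foldl_insert_run (r : List Int) :
    ∀ (n : Nat) (acc : List (List Int)) (b : Int), b = acc.length + n →
      (PySem.List.pyRange acc.length b 1).foldl
        (fun x i => PySem.List.insert x i r) acc = acc ++ List.replicate n r := by
  intro n
  induction n with
  | zero =>
    intro acc b hb
    have : PySem.List.pyRange (acc.length : Int) b 1 = [] := by
      rw [PySem.List.pyRange_one]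
      have : ((b - acc.length).toNat) = 0 := by omega
      simp [this]
    simp [this]
  | succ n ih =>
    intro acc b hb
    have hlt : (acc.length : Int) < b := by omega
    rw [PySem.List.pyRange_one_cons hlt]
    simp only [List.foldl_cons]
    have hstep : PySem.List.insert acc (acc.length : Int) r = acc ++ [r] :=
      PySem.List.insert_len acc r
    rw [hstep]
    have hlen : ((acc ++ [r]).length : Int) = (acc.length : Int) + 1 := by simp
    have := ih (acc ++ [r]) b (by simp; omega)
    rw [hlen] at this
    rw [this, List.append_assoc]
    rfl

-- A computes fila copies of the row pyRange 0 columna 1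
lemma portA_eq_replicate (fila columna : Int) :
    crearMatrizBidimencional3 fila columna
      = List.replicate fila.toNat (PySem.List.pyRange 0 columna 1) := by
  unfold crearMatrizBidimencional3
  simp only [foldl_append_singleton, List.nil_append]
  by_cases hf : fila ≤ 0
  · have h1 : PySem.List.pyRange 0 fila 1 = [] := by
      rw [PySem.List.pyRange_one]; simp; omega
    have h2 : fila.toNat = 0 := by omega
    simp [h1, h2]
  · have h0 : ((([] : List (List Int)).length : Int)) = 0 := by simp
    have := foldl_insert_run (PySem.List.pyRange 0 columna 1) fila.toNat
      ([] : List (List Int)) fila (by simp; omega)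
    rw [h0] at this
    simpa using this

-- drop of a range is a shifted range
lemma drop_range_eq (n m : Nat) :
    (List.range n).drop m = (List.range (n - m)).map (m + ·) := by
  by_cases h : m ≤ n
  · conv_lhs => rw [show n = m + (n - m) by omega, List.range_add]
    rw [List.drop_left' (by simp)]
  · have h1 : (List.range n).drop m = [] := by
      apply List.drop_eq_nil_of_le; simp; omega
    have h2 : n - m = 0 := by omega
    simp [h1, h2]

-- each columna-sized slice of the flat list is exactly the row pyRange 0 columna 1
lemma slice_flat_eq_row (fila columna r : Int) (hc : 0 < columna)
    (hr0 : 0 ≤ r) (hrf : r < fila) :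
    PySem.List.slice
        ((PySem.List.pyRange 0 (fila * columna) 1).map (fun k => PySem.Int.mod k columna))
        (some (r * columna)) (some ((r + 1) * columna))
      = PySem.List.pyRange 0 columna 1 := by
  have ha : 0 ≤ r * columna := by positivity
  rw [PySem.List.slice_toNat]
  rw [PySem.List.pyRange_one 0 (fila * columna)]
  rw [List.map_map]
  have hbn : ((r + 1) * columna).toNat - (r * columna).toNat = columna.toNat := by
    have h2 : (r * columna : Int) + columna = (r + 1) * columna := by ring
    omega
  rw [hbn, ← List.map_drop, drop_range_eq, List.map_map, ← List.map_take, List.take_range]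
  have hrest : columna.toNat ≤ (fila * columna - 0).toNat - (r * columna).toNat := by
    have h1 : (r + 1) * columna ≤ fila * columna := by
      apply mul_le_mul_of_nonneg_right _ (le_of_lt hc); omega
    have h2 : (r * columna : Int) + columna = (r + 1) * columna := by ring
    omega
  rw [min_eq_left hrest, PySem.List.pyRange_one 0 columna, show ((columna:Int) - 0).toNat = columna.toNat by omega]
  apply List.map_congr_left
  intro k hk
  rw [List.mem_range] at hk
  have hkc : (k : Int) < columna := by omega
  have hkc0 : (0 : Int) ≤ k := by positivity
  have haI : (((r * columna).toNat : Nat) : Int) = r * columna := Int.toNat_of_nonneg ha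
  simp only [Function.comp]
  rw [PySem.Int.mod_eq_emod_of_pos hc]
  have hx : ((0 : Int) + ↑((r * columna).toNat + k)) = ↑k + columna * r := by
    push_cast; rw [haI]; ring
  rw [hx, Int.add_mul_emod_self_left, Int.emod_eq_of_lt hkc0 hkc]
  · ring
  · exact ha
  · positivity

theorem crearMatrizBidimencional3_spec : Claim_equal_crearMatrizBidimencional3 := by
  intro fila columna _
  unfold Spec_crearMatrizBidimencional3 crearMatrizBidimencional3_alt
  rw [portA_eq_replicate]
  by_cases hc : columna ≤ 0
  · have hrow : PySem.List.pyRange 0 columna 1 = [] := by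
      rw [PySem.List.pyRange_one]; simp; omega
    simp [hc, hrow, List.map_const', PySem.List.length_pyRange_one]
  · have hcpos : 0 < columna := by omega
    rw [if_neg hc]
    have hmap :
        (PySem.List.pyRange 0 fila 1).map
            (fun r => PySem.List.slice
              ((PySem.List.pyRange 0 (fila * columna) 1).map (fun k => PySem.Int.mod k columna))
              (some (r * columna)) (some ((r + 1) * columna)))
          = (PySem.List.pyRange 0 fila 1).map (fun _ => PySem.List.pyRange 0 columna 1) := by
      apply List.map_congr_left
      intro r hr
      rw [PySem.List.mem_pyRange_one] at hr
      exact slice_flat_eq_row fila columna r hcpos hr.1 hr.2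
    simp only [hmap, List.map_const', PySem.List.length_pyRange_one]
    norm_num
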